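-- pv_equiv track=rewrite | github.com/ulalawell/made_introduction_python_autumn_2022 | 02/hm2.py | find_closest_number_to_zero
-- ===== SOURCE A (Python) =====
-- def find_closest_number_to_zero(numbers):
--     closest_numbers = []
--
--     if not numbers:
--         return closest_numbers
--     min_abs_value = abs(min(numbers, key=abs))
--
--     for element in numbers:
--         if abs(element) == min_abs_value:
--             closest_numbers.append(element)
--     return closest_numbers
-- ===== SOURCE B (Python) =====
-- def find_closest_number_to_zero(numbers):
--     result = []
--     min_abs = None
--     for element in numbers:
--         a = abs(element)
--         if min_abs is None or a < min_abs:
--             min_abs = a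
--             result = [element]
--         elif a == min_abs:
--             result.append(element)
--     return result
-- ===== Notes on version B (the rewrite author's own statement) =====
-- stated objective: alternative
-- what changed: Replaces A's two passes (min with key=abs, then a filtering pass) by a single pass that maintains the running minimum absolute value and rebuilds the accumulator whenever the minimum improves.
import Mathlib
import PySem

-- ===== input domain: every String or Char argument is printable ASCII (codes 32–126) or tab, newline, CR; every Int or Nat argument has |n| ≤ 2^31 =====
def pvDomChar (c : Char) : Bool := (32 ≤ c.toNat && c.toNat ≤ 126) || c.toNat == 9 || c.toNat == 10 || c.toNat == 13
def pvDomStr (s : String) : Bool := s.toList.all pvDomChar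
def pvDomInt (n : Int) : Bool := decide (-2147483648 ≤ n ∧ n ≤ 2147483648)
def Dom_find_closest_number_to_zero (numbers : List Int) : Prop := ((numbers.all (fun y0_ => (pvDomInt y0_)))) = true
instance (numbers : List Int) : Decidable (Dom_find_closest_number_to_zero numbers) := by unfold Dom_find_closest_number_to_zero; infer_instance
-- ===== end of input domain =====

-- B fuses A's two passes (min by abs, then filter) into one pass with a running
-- minimum that rebuilds the accumulator on improvement (objective: alternative; same cost).

-- ===== PORT A =====
def find_closest_number_to_zero (numbers : List Int) : List Int :=
  if numbers = [] then []
  else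
    match PySem.List.min? numbers (fun x => x.natAbs) with
    | none => []  -- unreachable: numbers ≠ []
    | some mn =>
        numbers.foldl (fun acc e => if e.natAbs == mn.natAbs then acc ++ [e] else acc) []

-- ===== PORT B =====
def bstep (st : Option Nat × List Int) (e : Int) : Option Nat × List Int :=
  let a := e.natAbs
  match st.1 with
  | none => (some a, [e])
  | some m => if a < m then (some a, [e]) else if a = m then (st.1, st.2 ++ [e]) else st

def find_closest_number_to_zero_alt (numbers : List Int) : List Int :=
  (numbers.foldl bstep (none, [])).2

-- ===== PRECONDITION & SPEC =====
def Spec_find_closest_number_to_zero (numbers : List Int) (out : List Int) : Prop := out = find_closest_number_to_zero_alt numbers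
instance (numbers : List Int) (out : List Int) : Decidable (Spec_find_closest_number_to_zero numbers out) := by unfold Spec_find_closest_number_to_zero; infer_instance

-- ===== CLAIM (what is proved, stated in full; the proofs are below) =====
def Claim_equal_find_closest_number_to_zero : Prop := ∀ (numbers : List Int), Dom_find_closest_number_to_zero numbers → Spec_find_closest_number_to_zero numbers (find_closest_number_to_zero numbers)

-- ===== LEMMAS AND PROOFS =====

/-- running minimum of absolute values, seeded with `a` -/
def runMin (t : List Int) (a : Nat) : Nat := t.foldl (fun acc e => min acc e.natAbs) a

lemma runMin_le_init (t : List Int) : ∀ a : Nat, runMin t a ≤ a := by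
  induction t with
  | nil => intro a; exact le_refl a
  | cons e t ih =>
      intro a
      exact le_trans (ih (min a e.natAbs)) (min_le_left _ _)

lemma runMin_le_mem (t : List Int) : ∀ a : Nat, ∀ x ∈ t, runMin t a ≤ x.natAbs := by
  induction t with
  | nil => intro a x hx; cases hx
  | cons e t ih =>
      intro a x hx
      rcases List.mem_cons.mp hx with rfl | hx
      · exact le_trans (runMin_le_init t _) (min_le_right _ _)
      · exact ih _ _ hx

lemma runMin_attained (t : List Int) : ∀ a : Nat, runMin t a = a ∨ ∃ x ∈ t, runMin t a = x.natAbs := by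
  induction t with
  | nil => intro a; exact Or.inl rfl
  | cons e t ih =>
      intro a
      rcases ih (min a e.natAbs) with h | ⟨x, hx, hxe⟩
      · rcases Nat.le_total a e.natAbs with hle | hle
        · left
          show runMin t (min a e.natAbs) = a
          rw [min_eq_left hle] at h ⊢; exact h
        · right
          refine ⟨e, List.mem_cons_self, ?_⟩
          show runMin t (min a e.natAbs) = e.natAbs
          rw [min_eq_right hle] at h ⊢; exact h
      · exact Or.inr ⟨x, List.mem_cons_of_mem _ hx, hxe⟩

/-- invariant for B's loop once the minimum is set -/
lemma loopB (t : List Int) : ∀ (m : Nat) (r : List Int),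
    t.foldl bstep (some m, r) =
      (some (runMin t m),
       (if runMin t m = m then r else []) ++ t.filter (fun e => e.natAbs == runMin t m)) := by
  induction t with
  | nil => intro m r; simp [runMin]
  | cons e t ih =>
      intro m r
      have hrm : runMin (e :: t) m = runMin t (min m e.natAbs) := rfl
      by_cases hlt : e.natAbs < m
      · have hmin : min m e.natAbs = e.natAbs := min_eq_right (le_of_lt hlt)
        have hne : runMin t e.natAbs ≠ m := by
          have := runMin_le_init t e.natAbs; omega
        have hstep : bstep (some m, r) e = (some e.natAbs, [e]) := by
          simp [bstep, hlt]
        rw [List.foldl_cons, hstep, ih, hrm, hmin]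
        simp only [Prod.mk.injEq, List.filter_cons, hne, if_false, true_and]
        rcases eq_or_ne (runMin t e.natAbs) e.natAbs with h | h
        · simp [h]
        · simp [h, Ne.symm h]
      · by_cases heq : e.natAbs = m
        · have hmin : min m e.natAbs = m := by omega
          have hstep : bstep (some m, r) e = (some m, r ++ [e]) := by
            simp [bstep, heq]
          rw [List.foldl_cons, hstep, ih, hrm, hmin]
          by_cases hM : runMin t m = m
          · simp [hM, heq, List.append_assoc]
          · have : ¬ (e.natAbs = runMin t m) := by omega
            simp [hM, this]
        · have hmin : min m e.natAbs = m := by omega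
          have hstep : bstep (some m, r) e = (some m, r) := by
            simp only [bstep]
            rw [if_neg hlt, if_neg heq]
          have hne : ¬ (e.natAbs = runMin t m) := by
            have := runMin_le_init t m; omega
          rw [List.foldl_cons, hstep, ih, hrm, hmin]
          simp [hne]

lemma altB (e : Int) (t : List Int) :
    find_closest_number_to_zero_alt (e :: t) =
      (e :: t).filter (fun x => x.natAbs == runMin t e.natAbs) := by
  have hstep : bstep (none, ([] : List Int)) e = (some e.natAbs, [e]) := by
    simp [bstep]
  unfold find_closest_number_to_zero_alt
  rw [List.foldl_cons, hstep, loopB]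
  by_cases hM : runMin t e.natAbs = e.natAbs
  · simp [hM]
  · have : ¬ (e.natAbs = runMin t e.natAbs) := fun h => hM h.symm
    simp [hM, this]

-- ===== VERDICT (by name: the statement is the Claim_ definition above) =====
theorem find_closest_number_to_zero_spec : Claim_equal_find_closest_number_to_zero := by
  intro numbers _
  unfold Spec_find_closest_number_to_zero
  cases numbers with
  | nil => rfl
  | cons e t =>
      rw [altB]
      unfold find_closest_number_to_zero
      have hne : (e :: t) ≠ [] := by simp
      rw [if_neg hne]
      rcases hmn : PySem.List.min? (e :: t) (fun x => x.natAbs) with _ | mn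
      · exact absurd ((PySem.List.min?_eq_none_iff _ _).mp hmn) hne
      · have hmem := PySem.List.min?_mem hmn
        have hmin := PySem.List.min?_isMin hmn
        have h1 : runMin t e.natAbs ≤ mn.natAbs := by
          rcases List.mem_cons.mp hmem with rfl | hm
          · exact runMin_le_init t _
          · exact runMin_le_mem t _ _ hm
        have h2 : mn.natAbs ≤ runMin t e.natAbs := by
          rcases runMin_attained t e.natAbs with h | ⟨x, hx, hxe⟩
          · rw [h]; exact hmin e List.mem_cons_self
          · rw [hxe]; exact hmin x (List.mem_cons_of_mem _ hx)
        have hM : mn.natAbs = runMin t e.natAbs := le_antisymm h2 h1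
        show List.foldl (fun acc x => if x.natAbs == mn.natAbs then acc ++ [x] else acc) [] (e :: t) = _
        rw [PySem.List.foldl_append_if_eq_filter, hM]
        simp
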